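-- pv_equiv track=rewrite | github.com/rachelannearthur/ElementsOfSoftwareDesign | BabyNames.py | find_highest_decade
-- ===== SOURCE A (Python) =====
-- def find_highest_decade(name, dictionary):
--    # set highest rank to lowest possible
--    highest_rank = 1001
--    # set highest decade to lowest index possible
--    highest_decade = 0
--    for i in range(len(dictionary[name])):
--      # if rank is higher, replace highest_rank and highest_decade
--      if dictionary[name][i] > highest_rank:
--        highest_rank = dictionary[name][i]
--        highest_decade = i
--    return highest_decade
-- ===== SOURCE B (Python) =====
-- def find_highest_decade(name, dictionary):
--     vals = dictionary[name]
--     if not vals: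
--         return 0
--     m = max(vals)
--     return vals.index(m) if m > 1001 else 0
-- ===== Notes on version B (the rewrite author's own statement) =====
-- stated objective: simpler
-- what changed: Replaces the index-tracking threshold scan with a max-then-locate decomposition: take the maximum, then return its first index via list.index when it exceeds 1001, else 0.
import Mathlib
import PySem

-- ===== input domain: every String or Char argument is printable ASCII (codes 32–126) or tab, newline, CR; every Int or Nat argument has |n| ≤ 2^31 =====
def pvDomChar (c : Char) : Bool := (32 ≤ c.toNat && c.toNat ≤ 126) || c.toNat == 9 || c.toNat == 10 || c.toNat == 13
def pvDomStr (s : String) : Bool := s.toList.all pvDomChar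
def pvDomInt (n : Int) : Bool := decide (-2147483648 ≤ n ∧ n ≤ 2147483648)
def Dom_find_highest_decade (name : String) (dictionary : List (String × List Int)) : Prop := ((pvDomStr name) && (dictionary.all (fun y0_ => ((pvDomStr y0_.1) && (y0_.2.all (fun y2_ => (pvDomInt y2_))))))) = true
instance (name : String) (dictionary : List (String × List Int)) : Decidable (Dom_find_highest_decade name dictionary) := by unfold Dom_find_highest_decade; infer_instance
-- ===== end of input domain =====

-- B replaces A's index-tracking threshold scan with a max-then-locate decomposition (simpler; same cost).

-- ===== PORT A =====
-- dict → association list, lookup = first match; dictionary[name] raises KeyError when absent (excluded by Pre_),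
-- so outside Pre_ the port uses [] as a dummy. dictionary[name][i] has i ∈ range(len), always in range, so pyGetD is exact.
def find_highest_decade (name : String) (dictionary : List (String × List Int)) : Int :=
  let vals := ((dictionary.find? (fun p => p.1 == name)).map (·.2)).getD []
  let st := (PySem.List.pyRange 0 (vals.length : Int) 1).foldl
    (fun (st : Int × Int) i =>
      if PySem.List.pyGetD vals i 0 > st.1 then (PySem.List.pyGetD vals i 0, i) else st)
    (1001, 0)
  st.2

-- ===== PORT B =====
def find_highest_decade_alt (name : String) (dictionary : List (String × List Int)) : Int :=
  let vals := ((dictionary.find? (fun p => p.1 == name)).map (·.2)).getD []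
  if vals.isEmpty then 0
  else
    match PySem.List.max? vals (fun v => v) with
    | none => 0
    | some m => if m > 1001 then ((PySem.List.index? vals m).getD 0 : Nat) else 0

-- ===== PRECONDITION & SPEC =====
-- Pre_ excludes exactly the inputs where 'dictionary[name]' raises KeyError (name not a key).
def Pre_find_highest_decade (name : String) (dictionary : List (String × List Int)) : Prop :=
  (dictionary.find? (fun p => p.1 == name)).isSome = true

instance (name : String) (dictionary : List (String × List Int)) : Decidable (Pre_find_highest_decade name dictionary) := by unfold Pre_find_highest_decade; infer_instance

def pvWitness_find_highest_decade : String × (List (String × List Int)) := ("bob", [("bob", [1000, 1500, 1500, 7])])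

def Spec_find_highest_decade (name : String) (dictionary : List (String × List Int)) (out : Int) : Prop := out = find_highest_decade_alt name dictionary
instance (name : String) (dictionary : List (String × List Int)) (out : Int) : Decidable (Spec_find_highest_decade name dictionary out) := by unfold Spec_find_highest_decade; infer_instance

-- ===== CLAIM (what is proved, stated in full; the proofs are below) =====
def Claim_equal_find_highest_decade : Prop := ∀ (name : String) (dictionary : List (String × List Int)), Dom_find_highest_decade name dictionary → Pre_find_highest_decade name dictionary → Spec_find_highest_decade name dictionary (find_highest_decade name dictionary)

-- ===== LEMMAS AND PROOFS =====

theorem pv_foldl_max_assoc (t : List Int) : ∀ (a b : Int), t.foldl max (max a b) = max a (t.foldl max b) := by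
  induction t with
  | nil => intro a b; simp
  | cons c t ih =>
    intro a b
    simp only [List.foldl_cons]
    rw [max_assoc, ih]

theorem pv_foldl_max_eq_self (t : List Int) (v : Int) (h : ∀ y ∈ t, y ≤ v) : t.foldl max v = v := by
  induction t with
  | nil => rfl
  | cons c t ih =>
    simp only [List.foldl_cons]
    rw [max_eq_left (h c (by simp))]
    exact ih fun y hy => h y (by simp [hy])

-- the A-loop over enumerate computes the running max and the index of its first occurrence
theorem pv_loopA (vals : List Int) : ∀ (s r d : Int),
    (PySem.List.enumerate vals s).foldl
        (fun (st : Int × Int) p => if p.2 > st.1 then (p.2, p.1) else st) (r, d) =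
      if vals.any (fun v => decide (r < v)) then
        (vals.foldl max r, s + (((PySem.List.index? vals (vals.foldl max r)).getD 0 : Nat) : Int))
      else (r, d) := by
  induction vals with
  | nil => intro s r d; simp [PySem.List.enumerate_nil]
  | cons v t ih =>
    intro s r d
    rw [PySem.List.enumerate_cons]
    simp only [List.foldl_cons, List.any_cons]
    by_cases hv : r < v
    · rw [if_pos (show v > r from hv), ih (s + 1) v s,
        show max r v = v from max_eq_right hv.le,
        if_pos (show (decide (r < v) || t.any fun y => decide (r < y)) = true by simp [hv])]
      by_cases h2 : (t.any fun y => decide (v < y)) = true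
      · rw [if_pos h2]
        obtain ⟨y, hy, hvy⟩ := List.any_eq_true.mp h2
        have hvy : v < y := by simpa using hvy
        have hym : y ≤ t.foldl max v := (PySem.List.le_foldl_max t v).2 y hy
        have hvm : v < t.foldl max v := lt_of_lt_of_le hvy hym
        have hmem : t.foldl max v ∈ t := by
          rcases PySem.List.foldl_max_mem t v with h | h
          · exact absurd h (by omega)
          · exact h
        rw [PySem.List.index?_cons_of_ne t (by omega : v ≠ t.foldl max v)]
        obtain ⟨k, hk⟩ := Option.isSome_iff_exists.mp ((PySem.List.index?_isSome_iff _ _).mpr hmem)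
        rw [hk]
        simp only [Option.map_some, Option.getD_some]
        simp only [Prod.mk.injEq]; exact ⟨trivial, by push_cast; ring⟩
      · rw [if_neg h2]
        have hall : ∀ y ∈ t, y ≤ v := by
          intro y hy
          by_contra hc
          exact h2 (List.any_eq_true.mpr ⟨y, hy, by simpa using not_le.mp hc⟩)
        rw [pv_foldl_max_eq_self t v hall, PySem.List.index?_cons_self]
        simp
    · rw [if_neg (show ¬ v > r from hv), ih (s + 1) r d,
        show max r v = r from max_eq_left (not_lt.mp hv),
        show decide (r < v) = false by simp [hv], Bool.false_or]
      by_cases h2 : (t.any fun y => decide (r < y)) = true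
      · rw [if_pos h2, if_pos h2]
        obtain ⟨y, hy, hry⟩ := List.any_eq_true.mp h2
        have hry : r < y := by simpa using hry
        have hym : y ≤ t.foldl max r := (PySem.List.le_foldl_max t r).2 y hy
        have hrm : r < t.foldl max r := lt_of_lt_of_le hry hym
        have hmem : t.foldl max r ∈ t := by
          rcases PySem.List.foldl_max_mem t r with h | h
          · exact absurd h (by omega)
          · exact h
        have hvm : v ≠ t.foldl max r := by
          have : v ≤ r := not_lt.mp hv
          omega
        rw [PySem.List.index?_cons_of_ne t hvm]
        obtain ⟨k, hk⟩ := Option.isSome_iff_exists.mp ((PySem.List.index?_isSome_iff _ _).mpr hmem)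
        rw [hk]
        simp only [Option.map_some, Option.getD_some]
        simp only [Prod.mk.injEq]; exact ⟨trivial, by push_cast; ring⟩
      · rw [if_neg h2, if_neg h2]

-- the two bodies agree for any list of values
theorem pv_main (vals : List Int) :
    ((PySem.List.pyRange 0 (vals.length : Int) 1).foldl
      (fun (st : Int × Int) i =>
        if PySem.List.pyGetD vals i 0 > st.1 then (PySem.List.pyGetD vals i 0, i) else st)
      (1001, 0)).2 =
    (if vals.isEmpty then 0
     else
       match PySem.List.max? vals (fun v => v) with
       | none => 0
       | some m => if m > 1001 then (((PySem.List.index? vals m).getD 0 : Nat) : Int) else 0) := by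
  have hrw : (PySem.List.pyRange 0 (vals.length : Int) 1).foldl
      (fun (st : Int × Int) i =>
        if PySem.List.pyGetD vals i 0 > st.1 then (PySem.List.pyGetD vals i 0, i) else st)
      (1001, 0)
    = (PySem.List.enumerate vals 0).foldl
      (fun (st : Int × Int) p => if p.2 > st.1 then (p.2, p.1) else st) (1001, 0) := by
    rw [PySem.List.enumerate_eq_map_pyRange vals 0, List.foldl_map]
    rfl
  rw [hrw, pv_loopA vals 0 1001 0]
  match vals with
  | [] => simp
  | x :: t =>
    simp only [List.isEmpty_cons, PySem.List.max?_id_cons]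
    have hmax : (x :: t).foldl max 1001 = max 1001 (t.foldl max x) := by
      simp only [List.foldl_cons]
      rw [show max (1001 : Int) x = max 1001 (max 1001 x) by omega,
        pv_foldl_max_assoc t 1001 (max 1001 x),
        pv_foldl_max_assoc t 1001 x]
      omega
    by_cases h2 : ((x :: t).any fun v => decide ((1001 : Int) < v)) = true
    · obtain ⟨y, hy, hry⟩ := List.any_eq_true.mp h2
      have hry : (1001 : Int) < y := by simpa using hry
      have hym : y ≤ t.foldl max x := by
        rcases List.mem_cons.mp hy with h | h
        · subst h; exact (PySem.List.le_foldl_max t y).1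
        · exact (PySem.List.le_foldl_max t x).2 y h
      have hm : (1001 : Int) < t.foldl max x := lt_of_lt_of_le hry hym
      rw [if_pos h2, if_pos (show t.foldl max x > 1001 from hm), hmax,
        max_eq_right hm.le]
      simp
    · have hle : t.foldl max x ≤ 1001 := by
        by_contra hc
        have hmem : t.foldl max x ∈ x :: t := by
          rcases PySem.List.foldl_max_mem t x with h | h
          · simp [h]
          · simp [h]
        exact h2 (List.any_eq_true.mpr ⟨_, hmem, by simpa using not_le.mp hc⟩)
      rw [if_neg h2, if_neg (fun h => absurd hle (not_le.mpr h))]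
      rfl

-- ===== VERDICT (by name: the statement is the Claim_ definition above) =====
theorem find_highest_decade_spec : Claim_equal_find_highest_decade := by
  intro name dictionary _ _
  unfold Spec_find_highest_decade find_highest_decade find_highest_decade_alt
  exact pv_main _
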